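-- pv_equiv track=rewrite | github.com/thejasmeetsingh/Competitive-programming | hackerrank/jim_and_the_skyscrapers.py | solve
-- ===== SOURCE A (Python) =====
-- def calc(value):
--     return value * (value - 1)
--
-- def solve(_arr):
--     counter = dict()
--     stack = []
--     result = 0
--
--     for val in _arr:
--         while stack and val > stack[-1]:
--             removed_item = stack.pop()
--             result += calc(counter[removed_item])
--             del counter[removed_item]
--
--         if counter.get(val):
--             counter[val] += 1
--         else:
--             counter[val] = 1
--             stack.append(val)
--
--     while stack:
--         removed_item = stack.pop()
--         result += calc(counter[removed_item])
--         del counter[removed_item]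
--
--     return result
-- ===== SOURCE B (Python) =====
-- def solve(_arr):
--     # For each position i, scan right until the first strictly taller building;
--     # each equal height seen before that contributes an ordered pair both ways (+2).
--     result = 0
--     n = len(_arr)
--     for i in range(n):
--         x = _arr[i]
--         for j in range(i + 1, n):
--             y = _arr[j]
--             if y > x:
--                 break
--             if y == x:
--                 result += 2
--     return result
-- ===== Notes on version B (the rewrite author's own statement) =====
-- stated objective: simpler
-- what changed: Replaces the monotonic stack + counter dict with a direct double scan: for each index, scan right until the first strictly taller value, adding 2 per equal value seen; no stack, dict or flushing phase.
import Mathlib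
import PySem

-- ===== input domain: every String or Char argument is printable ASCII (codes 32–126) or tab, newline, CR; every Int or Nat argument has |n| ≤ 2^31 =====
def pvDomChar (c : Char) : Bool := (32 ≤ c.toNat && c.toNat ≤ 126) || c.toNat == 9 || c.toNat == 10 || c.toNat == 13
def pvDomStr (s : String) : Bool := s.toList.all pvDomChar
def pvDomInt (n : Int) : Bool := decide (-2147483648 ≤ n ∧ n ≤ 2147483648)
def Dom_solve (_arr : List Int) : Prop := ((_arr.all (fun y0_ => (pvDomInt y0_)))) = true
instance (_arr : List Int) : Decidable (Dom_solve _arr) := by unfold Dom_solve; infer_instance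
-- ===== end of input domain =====

-- B replaces A's monotonic stack + counter dict with a direct double scan (simpler, no stack/dict; quadratic where A is linear).

-- ===== PORT A =====
-- Python helper 'calc' ('calc' is a Lean keyword, hence the name pyCalc)
def pyCalc (value : Int) : Int := value * (value - 1)

-- the 'while stack and val > stack[-1]' pop loop; the stack is kept top-first
-- (Python's stack[-1]/append/pop act at the END of the list, here at the HEAD)
def popLoop (val : Int) : PySem.Dict Int Int → List Int → Int → PySem.Dict Int Int × List Int × Int
  | c, [], r => (c, [], r)
  | c, v :: st, r =>
    if val > v then popLoop val (c.erase v) st (r + pyCalc (c.getD v 0))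
    else (c, v :: st, r)

-- body of 'for val in _arr' ('if counter.get(val)' is truthy iff the stored count is nonzero)
def stepA (s : PySem.Dict Int Int × List Int × Int) (val : Int) :
    PySem.Dict Int Int × List Int × Int :=
  let t := popLoop val s.1 s.2.1 s.2.2
  if t.1.getD val 0 ≠ 0 then (t.1.insert val (t.1.getD val 0 + 1), t.2.1, t.2.2)
  else (t.1.insert val 1, val :: t.2.1, t.2.2)

-- the final 'while stack' flush
def flushA : PySem.Dict Int Int → List Int → Int → Int
  | _, [], r => r
  | c, v :: st, r => flushA (c.erase v) st (r + pyCalc (c.getD v 0))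

def solve (_arr : List Int) : Int :=
  let s := _arr.foldl stepA (PySem.Dict.empty, [], 0)
  flushA s.1 s.2.1 s.2.2

-- ===== PORT B =====
-- inner 'for j in range(i+1, n)' scan with break on a strictly taller value
def innerB (x : Int) : List Int → Int
  | [] => 0
  | y :: ys => if y > x then 0 else (if y = x then 2 else 0) + innerB x ys

def solve_alt : List Int → Int
  | [] => 0
  | x :: xs => innerB x xs + solve_alt xs

-- ===== PRECONDITION & SPEC =====
def Spec_solve (_arr : List Int) (out : Int) : Prop := out = solve_alt _arr
instance (_arr : List Int) (out : Int) : Decidable (Spec_solve _arr out) := by unfold Spec_solve; infer_instance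

-- ===== CLAIM (what is proved, stated in full; the proofs are below) =====
def Claim_equal_solve : Prop := ∀ (_arr : List Int), Dom_solve _arr → Spec_solve _arr (solve _arr)

-- ===== LEMMAS AND PROOFS =====

-- occurrences of v in l before the first element strictly greater than v
def occ (v : Int) : List Int → Int
  | [] => 0
  | y :: ys => if y > v then 0 else (if y = v then 1 else 0) + occ v ys

-- the pending contribution of the stack values, given the remaining input l
def segSum (c : PySem.Dict Int Int) (l : List Int) : List Int → Int
  | [] => 0
  | v :: st => (pyCalc (c.getD v 0 + occ v l) - pyCalc (occ v l)) + segSum c l st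

-- A's loop invariant: the stack is strictly increasing top-down, and the counter
-- holds a positive count exactly for the stacked values
def InvA (c : PySem.Dict Int Int) (st : List Int) : Prop :=
  st.Pairwise (· < ·) ∧ (∀ v ∈ st, 1 ≤ c.getD v 0) ∧ (∀ v, v ∉ st → c.getD v 0 = 0)

lemma innerB_eq_occ (x : Int) (l : List Int) : innerB x l = 2 * occ x l := by
  induction l with
  | nil => simp [innerB, occ]
  | cons y ys ih => simp only [innerB, occ]; split_ifs <;> (simp [ih]; try ring)

lemma getD_erase_of_ne (c : PySem.Dict Int Int) (v w : Int) (h : w ≠ v) :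
    (c.erase v).getD w 0 = c.getD w 0 := by
  obtain ⟨items⟩ := c
  simp only [PySem.Dict.erase, PySem.Dict.getD, PySem.Dict.get?]
  congr 2
  induction items with
  | nil => rfl
  | cons p tl ih =>
    have hvw : (v == w) = false := by simp; exact fun e => h e.symm
    have hwv : (w == v) = false := by simp [h]
    by_cases hv : p.1 = v
    · simp [hv, hvw, ih]
    · by_cases hw : p.1 = w
      · simp [hw, hwv]
      · simp [hv, hw, ih]

lemma getD_erase_self (c : PySem.Dict Int Int) (v : Int) :
    (c.erase v).getD v 0 = 0 := by
  obtain ⟨items⟩ := c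
  simp only [PySem.Dict.erase, PySem.Dict.getD, PySem.Dict.get?]
  have : List.find? (fun p => p.1 == v) (items.filter (fun p => !p.1 == v)) = none := by
    rw [List.find?_eq_none]
    intro p hp
    simp only [List.mem_filter] at hp
    simpa using hp.2
  simp [this]

lemma segSum_congr {c c' : PySem.Dict Int Int} {l l' : List Int} (st : List Int)
    (h : ∀ v ∈ st, c.getD v 0 = c'.getD v 0) (h2 : ∀ v ∈ st, occ v l = occ v l') :
    segSum c l st = segSum c' l' st := by
  induction st with
  | nil => simp [segSum]
  | cons v tl ih =>
    simp only [segSum, h v (by simp), h2 v (by simp)]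
    rw [ih (fun w hw => h w (by simp [hw])) (fun w hw => h2 w (by simp [hw]))]

lemma flushA_eq (st : List Int) (c : PySem.Dict Int Int) (r : Int)
    (hnd : st.Pairwise (· < ·)) : flushA c st r = r + segSum c [] st := by
  induction st generalizing c r with
  | nil => simp [flushA, segSum]
  | cons v tl ih =>
    have hv : ∀ w ∈ tl, v < w := fun w hw => List.rel_of_pairwise_cons hnd hw
    simp only [flushA, segSum]
    rw [ih _ _ hnd.of_cons,
        segSum_congr tl (fun w hw => getD_erase_of_ne c v w (fun e => absurd (e ▸ hv w hw) (lt_irrefl _)))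
          (fun _ _ => rfl)]
    simp [occ, pyCalc]; ring

-- the pop loop: preserves the invariant, stops at a value ≥ val, and moves exactly
-- the pending contribution of the popped values into the accumulator
lemma popLoop_lemma (x : Int) (l' : List Int) :
    ∀ (st : List Int) (c : PySem.Dict Int Int) (r : Int), InvA c st →
      InvA (popLoop x c st r).1 (popLoop x c st r).2.1 ∧
      (∀ v ∈ (popLoop x c st r).2.1, x ≤ v) ∧
      (popLoop x c st r).2.2 + segSum (popLoop x c st r).1 (x :: l') (popLoop x c st r).2.1
        = r + segSum c (x :: l') st := by
  intro st
  induction st with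
  | nil => intro c r hInv; simpa [popLoop, segSum] using hInv
  | cons v tl ih =>
    intro c r hInv
    obtain ⟨hpw, hmem, hnot⟩ := hInv
    have hv : ∀ w ∈ tl, v < w := fun w hw => List.rel_of_pairwise_cons hpw hw
    by_cases hx : x > v
    · have hInv' : InvA (c.erase v) tl := by
        refine ⟨hpw.of_cons, ?_, ?_⟩
        · intro w hw
          rw [getD_erase_of_ne c v w (fun e => absurd (e ▸ hv w hw) (lt_irrefl _))]
          exact hmem w (by simp [hw])
        · intro w hw
          by_cases hwv : w = v
          · simpa [hwv] using getD_erase_self c v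
          · rw [getD_erase_of_ne c v w hwv]
            exact hnot w (by simp [hw, hwv])
      have := ih (c.erase v) (r + pyCalc (c.getD v 0)) hInv'
      simp only [popLoop, if_pos hx]
      refine ⟨this.1, this.2.1, ?_⟩
      rw [this.2.2]
      have hocc : occ v (x :: l') = 0 := by simp [occ, hx]
      rw [segSum_congr tl (fun w hw => getD_erase_of_ne c v w (fun e => absurd (e ▸ hv w hw) (lt_irrefl _))) (fun _ _ => rfl)]
      simp [segSum, hocc, pyCalc]; ring
    · simp only [popLoop, if_neg hx]
      refine ⟨⟨hpw, hmem, hnot⟩, ?_, ?_⟩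
      swap
      · trivial
      intro w hw
      rcases List.mem_cons.mp hw with h | h
      · omega
      · have := hv w h; omega

-- one iteration of the for-loop advances the accounted total by innerB x l'
lemma stepA_lemma (x : Int) (l' : List Int) (st : List Int) (c : PySem.Dict Int Int) (r : Int)
    (hInv : InvA c st) :
    InvA (stepA (c, st, r) x).1 (stepA (c, st, r) x).2.1 ∧
    (stepA (c, st, r) x).2.2 + segSum (stepA (c, st, r) x).1 l' (stepA (c, st, r) x).2.1
      = r + segSum c (x :: l') st + innerB x l' := by
  obtain ⟨hInv', hge, heq⟩ := popLoop_lemma x l' st c r hInv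
  set t := popLoop x c st r with ht
  obtain ⟨hpw, hmem, hnot⟩ := hInv'
  rw [innerB_eq_occ]
  by_cases hz : t.1.getD x 0 ≠ 0
  · -- counter.get(val) truthy: val is on the stack (at the top) and gets incremented
    have hx_mem : x ∈ t.2.1 := by
      by_contra hxm; exact hz (hnot x hxm)
    obtain ⟨h, tl, hcons⟩ : ∃ h tl, t.2.1 = h :: tl := by
      cases hst : t.2.1 with
      | nil => rw [hst] at hx_mem; simp at hx_mem
      | cons a b => exact ⟨a, b, rfl⟩
    have hhd : ∀ w ∈ tl, h < w := fun w hw => List.rel_of_pairwise_cons (hcons ▸ hpw) hw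
    have hx_eq : x = h := by
      rw [hcons] at hx_mem hge
      rcases List.mem_cons.mp hx_mem with h1 | h1
      · exact h1
      · have := hge h (by simp); have := hhd x h1; omega
    have hstep : stepA (c, st, r) x = (t.1.insert x (t.1.getD x 0 + 1), t.2.1, t.2.2) := by
      simp only [stepA]; rw [← ht]; exact if_pos hz
    subst hx_eq
    rw [hstep]
    simp only [hcons]
    refine ⟨⟨hcons ▸ hpw, ?_, ?_⟩, ?_⟩
    · intro w hw
      rcases List.mem_cons.mp hw with h1 | h1
      · subst h1; rw [PySem.Dict.getD_insert_self]
        have := hmem w (hcons ▸ List.mem_cons_self)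
        omega
      · rw [PySem.Dict.getD_insert_of_ne _ _ _ (fun e => absurd (e ▸ hhd w h1) (lt_irrefl _))]
        exact hmem w (hcons ▸ by simp [h1])
    · intro w hw
      simp only [List.mem_cons, not_or] at hw
      rw [PySem.Dict.getD_insert_of_ne _ _ _ hw.1]
      exact hnot w (by simp [hcons, hw.1, hw.2])
    · rw [← heq, hcons]
      have htl : segSum (t.1.insert x (t.1.getD x 0 + 1)) l' tl = segSum t.1 (x :: l') tl := by
        refine segSum_congr tl (fun w hw => PySem.Dict.getD_insert_of_ne _ _ _ (fun e => absurd (e ▸ hhd w hw) (lt_irrefl _))) (fun w hw => ?_)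
        have hxw := hhd w hw
        simp only [occ]
        rw [if_neg (by omega : ¬ w < x), if_neg (by omega : ¬ x = w)]
        ring
      have hocc : occ x (x :: l') = 1 + occ x l' := by simp [occ]
      simp only [segSum, htl, hocc, PySem.Dict.getD_insert_self, pyCalc]
      ring
  · -- counter.get(val) falsy: val is fresh, set count 1 and push
    rw [not_not] at hz
    have hx_nmem : x ∉ t.2.1 := fun hm => by have := hmem x hm; omega
    have hstep : stepA (c, st, r) x = (t.1.insert x 1, x :: t.2.1, t.2.2) := by
      simp only [stepA]; rw [← ht]; exact if_neg (by simp [hz])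
    rw [hstep]
    have hlt : ∀ w ∈ t.2.1, x < w := by
      intro w hw
      have := hge w hw
      rcases eq_or_lt_of_le this with h1 | h1
      · exact absurd (h1 ▸ hw) hx_nmem
      · exact h1
    refine ⟨⟨List.pairwise_cons.mpr ⟨hlt, hpw⟩, ?_, ?_⟩, ?_⟩
    · intro w hw
      rcases List.mem_cons.mp hw with h1 | h1
      · subst h1; rw [PySem.Dict.getD_insert_self]
      · rw [PySem.Dict.getD_insert_of_ne _ _ _ (fun e => absurd (e ▸ hlt w h1) (lt_irrefl _))]
        exact hmem w h1
    · intro w hw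
      simp only [List.mem_cons, not_or] at hw
      rw [PySem.Dict.getD_insert_of_ne _ _ _ hw.1]
      exact hnot w hw.2
    · rw [← heq]
      have htl : segSum (t.1.insert x 1) l' t.2.1 = segSum t.1 (x :: l') t.2.1 := by
        refine segSum_congr _ (fun w hw => PySem.Dict.getD_insert_of_ne _ _ _ (fun e => absurd (e ▸ hlt w hw) (lt_irrefl _))) (fun w hw => ?_)
        have hxw := hlt w hw
        simp only [occ]
        rw [if_neg (by omega : ¬ w < x), if_neg (by omega : ¬ x = w)]
        ring
      simp only [segSum, htl, PySem.Dict.getD_insert_self, pyCalc]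
      ring

-- main invariant: running the rest of the loop and flushing yields the accumulator
-- plus the stack's pending contribution plus B's count over the remaining input
lemma mainA (l : List Int) :
    ∀ (c : PySem.Dict Int Int) (st : List Int) (r : Int), InvA c st →
      flushA (l.foldl stepA (c, st, r)).1 (l.foldl stepA (c, st, r)).2.1 (l.foldl stepA (c, st, r)).2.2
        = r + segSum c l st + solve_alt l := by
  induction l with
  | nil =>
    intro c st r hInv
    simp only [List.foldl_nil, solve_alt]
    rw [flushA_eq st c r hInv.1]
    have : segSum c [] st = segSum c [] st := rfl
    ring
  | cons x l' ih =>
    intro c st r hInv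
    obtain ⟨hInv2, heq⟩ := stepA_lemma x l' st c r hInv
    simp only [List.foldl_cons]
    have := ih (stepA (c, st, r) x).1 (stepA (c, st, r) x).2.1 (stepA (c, st, r) x).2.2 hInv2
    simp only [solve_alt]
    calc flushA ((l'.foldl stepA (stepA (c, st, r) x)).1) _ _
        = (stepA (c, st, r) x).2.2 + segSum (stepA (c, st, r) x).1 l' (stepA (c, st, r) x).2.1 + solve_alt l' := by
          simpa using this
      _ = r + segSum c (x :: l') st + (innerB x l' + solve_alt l') := by rw [heq]; ring

-- ===== VERDICT (by name: the statement is the Claim_ definition above) =====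
theorem solve_spec : Claim_equal_solve := by
  intro l _
  unfold Spec_solve solve
  have hInv : InvA PySem.Dict.empty [] := by
    refine ⟨List.Pairwise.nil, by simp, fun v _ => ?_⟩
    simp [PySem.Dict.getD, PySem.Dict.get?, PySem.Dict.empty]
  have := mainA l PySem.Dict.empty [] 0 hInv
  simp only [segSum] at this
  simpa using this
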